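-- pv_equiv track=rewrite | github.com/barszu/ASD | nauka1/do egzaminu/probne wozniaka/egz8/egzP8a/egzP8a.py | reklamy
-- ===== SOURCE A (Python) =====
-- def reklamy ( Intervals, val, max_days ):
--     #Tutaj proszę wpisać własną implementację
--     I = [(a,b,val[i]) for i,(a,b) in enumerate(Intervals)]
--     I.sort()
--     n = len(I)
--     matching_list = [[] for i in range(n)] #lista gdzie i nie koliduje z j (wewnetrznie moga)
--     for i in range(n):
--         x , y , _ = I[i]
--         for j in range(i+1,n):
--             a , b , v = I[j]
--             #no colision -> add both to adjecty list
--             if not a<= y: #no colision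
--                 matching_list[i].append(j)
--                 matching_list[j].append(i)
--
--     global_max = 0
--     for i in range(n):
--         temp_max = I[i][2]
--         max_from_another = 0
--         for j in matching_list[i]:
--             max_from_another = max(max_from_another , I[j][2])
--         global_max = max( global_max , temp_max + max_from_another)
--
--     return global_max
-- ===== SOURCE B (Python) =====
-- def _bisect_right(arr, x):
--     lo, hi = 0, len(arr)
--     while lo < hi:
--         mid = (lo + hi) // 2
--         if x < arr[mid]:
--             hi = mid
--         else:
--             lo = mid + 1
--     return lo
--
-- def reklamy(Intervals, val, max_days):
--     # sort intervals; for each one, the best disjoint partner starts strictly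
--     # after it ends, found by binary search + a 0-floored suffix maximum of values
--     items = sorted((a, b, val[i]) for i, (a, b) in enumerate(Intervals))
--     n = len(items)
--     starts = [t[0] for t in items]
--     suf = [0] * (n + 1)          # suf[k] = max(0, max value among items[k:])
--     for k in range(n - 1, -1, -1):
--         suf[k] = max(items[k][2], suf[k + 1])
--     best = 0
--     for i in range(n):
--         a, b, v = items[i]
--         lo = _bisect_right(starts, b)   # first index whose start exceeds b
--         if lo < i + 1:
--             lo = i + 1                  # only pair with strictly later items
--         best = max(best, v + suf[lo])
--     return best
-- ===== Notes on version B (the rewrite author's own statement) =====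
-- stated objective: faster
-- what changed: Instead of building pairwise no-collision adjacency lists with a quadratic double loop and scanning each list, B sorts once, precomputes a 0-floored suffix maximum of values, and binary-searches the first interval starting after each end, so the best disjoint partner is found in O(log n) per interval.
-- outside the precondition, e.g. on reklamy([(0, 1)], [], 0): A raises IndexError, B raises IndexError
import Mathlib
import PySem

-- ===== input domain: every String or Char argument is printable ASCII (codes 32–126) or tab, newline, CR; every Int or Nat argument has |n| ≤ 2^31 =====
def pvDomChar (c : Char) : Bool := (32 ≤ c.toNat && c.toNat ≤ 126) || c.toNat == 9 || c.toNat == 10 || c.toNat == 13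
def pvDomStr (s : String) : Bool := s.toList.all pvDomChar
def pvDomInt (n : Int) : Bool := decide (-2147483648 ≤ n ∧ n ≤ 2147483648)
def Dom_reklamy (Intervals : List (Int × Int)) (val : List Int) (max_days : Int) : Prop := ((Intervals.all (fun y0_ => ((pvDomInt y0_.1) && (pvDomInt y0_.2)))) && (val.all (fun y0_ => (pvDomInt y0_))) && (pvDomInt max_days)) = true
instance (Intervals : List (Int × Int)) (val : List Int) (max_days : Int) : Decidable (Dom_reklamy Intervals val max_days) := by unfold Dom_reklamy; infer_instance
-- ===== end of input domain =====

-- B replaces A's quadratic adjacency-list construction by sort + 0-floored suffix maximum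
-- + binary search for the first disjoint later interval (measured faster at large sizes).

-- ===== PORT A =====
-- Python sorts the triples (a, b, val[i]) by tuple comparison; pvKey encodes that
-- lexicographic order monotonically and injectively into one Int — exact on the
-- Dom-bounded components (|x| ≤ 2^31, guaranteed by Dom_reklamy).
def pvKey (t : Int × Int × Int) : Int :=
  (t.1 + 4294967296) * 295147905179352825856 + (t.2.1 + 4294967296) * 17179869184 + (t.2.2 + 4294967296)

-- I = sorted([(a, b, val[i]) for i, (a, b) in enumerate(Intervals)]); both Pythons
-- start with this same line.  val[i] is in range under Pre_ (i < len(Intervals) ≤ len(val)),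
-- so pyGetD's default 0 is never consulted there.
def pvBuildI (Intervals : List (Int × Int)) (val : List Int) : List (Int × Int × Int) :=
  PySem.List.sorted ((PySem.List.enumerate Intervals).map
    (fun p => (p.2.1, p.2.2, PySem.List.pyGetD val p.1 0))) pvKey

-- body of A's inner loop: if not a <= y: matching[i].append(j); matching[j].append(i)
def pvStep (l : List (Int × Int × Int)) (m : List (List Nat)) (i j : Nat) : List (List Nat) :=
  if ¬ ((l.getD j (0, 0, 0)).1 ≤ (l.getD i (0, 0, 0)).2.1) then
    let m1 := m.set i (m.getD i [] ++ [j])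
    m1.set j (m1.getD j [] ++ [i])
  else m

-- A's double loop building matching_list
def pvMatching (l : List (Int × Int × Int)) : List (List Nat) :=
  (List.range l.length).foldl
    (fun m i => (List.range' (i + 1) (l.length - (i + 1))).foldl (fun m j => pvStep l m i j) m)
    (List.replicate l.length ([] : List Nat))

def reklamy (Intervals : List (Int × Int)) (val : List Int) (max_days : Int) : Int :=
  let I := pvBuildI Intervals val
  let matching := pvMatching I
  (List.range I.length).foldl
    (fun g i =>
      max g ((I.getD i (0, 0, 0)).2.2 +
        (matching.getD i []).foldl (fun acc j => max acc ((I.getD j (0, 0, 0)).2.2)) 0))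
    0

-- ===== PORT B =====
-- suf, built back to front: suf[k] = max(items[k][2], suf[k+1]), suf[n] = 0
def pvSuf : List (Int × Int × Int) → List Int
  | [] => [0]
  | t :: r => let s := pvSuf r; (max t.2.2 (s.getD 0 0)) :: s

def reklamy_alt (Intervals : List (Int × Int)) (val : List Int) (max_days : Int) : Int :=
  let I := pvBuildI Intervals val
  let starts := I.map (fun t => t.1)
  let suf := pvSuf I
  -- Source B's hand-written _bisect_right is the stdlib bisect_right loop = PySem.List.bisectRight
  (List.range I.length).foldl
    (fun best i =>
      let t := I.getD i (0, 0, 0)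
      let r := PySem.List.bisectRight starts t.2.1
      let lo := if r < i + 1 then i + 1 else r
      max best (t.2.2 + suf.getD lo 0))
    0

-- ===== PRECONDITION & SPEC =====
-- Pre_ excludes exactly the inputs where A raises IndexError: val[i] is read for every
-- index of Intervals, so A returns iff len(Intervals) <= len(val).  (B reads val[i] too.)
def Pre_reklamy (Intervals : List (Int × Int)) (val : List Int) (max_days : Int) : Prop :=
  Intervals.length ≤ val.length
instance (Intervals : List (Int × Int)) (val : List Int) (max_days : Int) : Decidable (Pre_reklamy Intervals val max_days) := by unfold Pre_reklamy; infer_instance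

def pvWitness_reklamy : (List (Int × Int)) × List Int × Int := ([(0, 2), (3, 5)], [3, 4], 10)

def Spec_reklamy (Intervals : List (Int × Int)) (val : List Int) (max_days : Int) (out : Int) : Prop := out = reklamy_alt Intervals val max_days
instance (Intervals : List (Int × Int)) (val : List Int) (max_days : Int) (out : Int) : Decidable (Spec_reklamy Intervals val max_days out) := by unfold Spec_reklamy; infer_instance

-- ===== CLAIM (what is proved, stated in full; the proofs are below) =====
def Claim_equal_reklamy : Prop := ∀ (Intervals : List (Int × Int)) (val : List Int) (max_days : Int), Dom_reklamy Intervals val max_days → Pre_reklamy Intervals val max_days → Spec_reklamy Intervals val max_days (reklamy Intervals val max_days)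

-- ===== LEMMAS AND PROOFS =====

-- generic: a running max of a projection is its initial value or is attained at a member
theorem pv_foldl_maxf_cases {α : Type} (f : α → Int) :
    ∀ (xs : List α) (init : Int),
      xs.foldl (fun a x => max a (f x)) init = init ∨
        ∃ x ∈ xs, xs.foldl (fun a x => max a (f x)) init = f x := by
  intro xs
  induction xs with
  | nil => intro init; simp
  | cons y t ih =>
    intro init
    simp only [List.foldl_cons]
    rcases ih (max init (f y)) with h | ⟨x, hx, hfx⟩
    · rcases max_choice init (f y) with h2 | h2
      · left; rw [h, h2]
      · right; exact ⟨y, by simp, by rw [h, h2]⟩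
    · right; exact ⟨x, by simp [hx], hfx⟩

theorem pv_getD_set_self (m : List (List Nat)) (i : Nat) (x : List Nat) (h : i < m.length) :
    (m.set i x).getD i [] = x := by
  simp [List.getD_eq_getElem?_getD, h]

theorem pv_getD_set_ne (m : List (List Nat)) (i k : Nat) (x : List Nat) (h : k ≠ i) :
    (m.set i x).getD k [] = m.getD k [] := by
  simp [List.getD_eq_getElem?_getD, List.getElem?_set_ne (Ne.symm h)]

-- the intervals at positions i and j of the sorted list do not collide (A's rule)
def pvCompat (l : List (Int × Int × Int)) (i j : Nat) : Prop :=
  (i < j ∧ (l.getD i (0, 0, 0)).2.1 < (l.getD j (0, 0, 0)).1) ∨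
  (j < i ∧ (l.getD j (0, 0, 0)).2.1 < (l.getD i (0, 0, 0)).1)

-- invariant of A's double loop: after outer rounds < i and, in round i, inner indices < j0,
-- matching[k] holds exactly the partners recorded for the processed pairs
def pvInv (l : List (Int × Int × Int)) (i j0 : Nat) (m : List (List Nat)) : Prop :=
  m.length = l.length ∧
  ∀ k j : Nat, j ∈ m.getD k [] ↔
    (k < l.length ∧ j < l.length ∧ pvCompat l k j ∧
      (min k j < i ∨ (min k j = i ∧ max k j < j0)))

theorem pv_step_inv (l : List (Int × Int × Int)) (i j0 : Nat) (m : List (List Nat))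
    (hm : pvInv l i j0 m) (hij : i < j0) (hj0 : j0 < l.length) :
    pvInv l i (j0 + 1) (pvStep l m i j0) := by
  obtain ⟨hlen, hmem⟩ := hm
  have hi : i < l.length := lt_trans hij hj0
  have hne : i ≠ j0 := Nat.ne_of_lt hij
  unfold pvStep
  by_cases hc : (l.getD j0 (0, 0, 0)).1 ≤ (l.getD i (0, 0, 0)).2.1
  · -- the no-collision test fails: nothing appended
    simp only [hc, not_true_eq_false, if_false]
    refine ⟨hlen, fun k j => ?_⟩
    rw [hmem k j]
    constructor
    · rintro ⟨h1, h2, h3, h4⟩; exact ⟨h1, h2, h3, by omega⟩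
    · rintro ⟨h1, h2, h3, h4⟩
      refine ⟨h1, h2, h3, ?_⟩
      rcases h4 with h4 | ⟨h4a, h4b⟩
      · exact Or.inl h4
      · -- if the pair were exactly {i, j0} then pvCompat would contradict hc
        rcases Nat.lt_or_ge (max k j) j0 with h5 | h5
        · exact Or.inr ⟨h4a, h5⟩
        · have hmax : max k j = j0 := by omega
          exfalso
          rcases h3 with ⟨hlt, hcmp⟩ | ⟨hlt, hcmp⟩
          · have hk : k = i := by omega
            have hj : j = j0 := by omega
            rw [hk, hj] at hcmp; omega
          · have hj : j = i := by omega
            have hk : k = j0 := by omega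
            rw [hk, hj] at hcmp; omega
  · simp only [hc, not_false_eq_true, if_true]
    have hcomp : pvCompat l i j0 := Or.inl ⟨hij, by omega⟩
    set m1 := m.set i (m.getD i [] ++ [j0]) with hm1
    have hlen1 : m1.length = l.length := by rw [hm1, List.length_set]; exact hlen
    have hgi : m1.getD i [] = m.getD i [] ++ [j0] :=
      pv_getD_set_self m i _ (by omega)
    have hgj : m1.getD j0 [] = m.getD j0 [] :=
      pv_getD_set_ne m i j0 _ (Ne.symm hne)
    have hgo : ∀ k, k ≠ i → m1.getD k [] = m.getD k [] := fun k hk =>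
      pv_getD_set_ne m i k _ hk
    refine ⟨by rw [List.length_set]; exact hlen1, fun k j => ?_⟩
    by_cases hki : k = i
    · subst hki
      rw [pv_getD_set_ne m1 j0 k _ hne, hgi]
      simp only [List.mem_append, List.mem_singleton, hmem k j]
      constructor
      · rintro (⟨h1, h2, h3, h4⟩ | rfl)
        · exact ⟨h1, h2, h3, by omega⟩
        · exact ⟨hi, hj0, hcomp, by omega⟩
      · rintro ⟨h1, h2, h3, h4⟩
        rcases Nat.lt_or_ge (max k j) j0 with h5 | h5
        · rcases h4 with h4 | ⟨h4a, _⟩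
          · exact Or.inl ⟨h1, h2, h3, Or.inl h4⟩
          · exact Or.inl ⟨h1, h2, h3, Or.inr ⟨h4a, h5⟩⟩
        · rcases h4 with h4 | ⟨h4a, h4b⟩
          · exact Or.inl ⟨h1, h2, h3, Or.inl h4⟩
          · right
            have : j = j0 := by
              rcases h3 with ⟨hlt, _⟩ | ⟨hlt, _⟩ <;> omega
            exact this
    · by_cases hkj : k = j0
      · subst hkj
        rw [pv_getD_set_self m1 k _ (by omega), hgj]
        simp only [List.mem_append, List.mem_singleton, hmem k j]
        constructor
        · rintro (⟨h1, h2, h3, h4⟩ | rfl)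
          · exact ⟨h1, h2, h3, by omega⟩
          · exact ⟨hj0, hi, Or.inr ⟨hij, by omega⟩, by omega⟩
        · rintro ⟨h1, h2, h3, h4⟩
          rcases h4 with h4 | ⟨h4a, h4b⟩
          · exact Or.inl ⟨h1, h2, h3, Or.inl h4⟩
          · rcases Nat.lt_or_ge (max k j) k with h5 | h5
            · exact Or.inl ⟨h1, h2, h3, Or.inr ⟨h4a, h5⟩⟩
            · right
              have : j = i := by
                rcases h3 with ⟨hlt, _⟩ | ⟨hlt, _⟩ <;> omega
              exact this
      · rw [pv_getD_set_ne m1 j0 k _ hkj, hgo k hki]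
        rw [hmem k j]
        constructor
        · rintro ⟨h1, h2, h3, h4⟩; exact ⟨h1, h2, h3, by omega⟩
        · rintro ⟨h1, h2, h3, h4⟩
          refine ⟨h1, h2, h3, ?_⟩
          rcases h4 with h4 | ⟨h4a, h4b⟩
          · exact Or.inl h4
          · rcases Nat.lt_or_ge (max k j) j0 with h5 | h5
            · exact Or.inr ⟨h4a, h5⟩
            · exfalso
              rcases h3 with ⟨hlt, _⟩ | ⟨hlt, _⟩ <;> omega

theorem pv_inner_inv (l : List (Int × Int × Int)) (i : Nat) :
    ∀ (cnt j0 : Nat) (m : List (List Nat)), pvInv l i j0 m → i < j0 → j0 + cnt ≤ l.length →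
      pvInv l i (j0 + cnt) ((List.range' j0 cnt).foldl (fun m j => pvStep l m i j) m) := by
  intro cnt
  induction cnt with
  | zero => intro j0 m hm _ _; simpa using hm
  | succ c ih =>
    intro j0 m hm hij hle
    rw [List.range'_succ, List.foldl_cons]
    have h1 := pv_step_inv l i j0 m hm hij (by omega)
    have := ih (j0 + 1) _ h1 (by omega) (by omega)
    have heq : j0 + 1 + c = j0 + (c + 1) := by omega
    rwa [heq] at this

theorem pv_outer_inv (l : List (Int × Int × Int)) :
    ∀ (i : Nat), i ≤ l.length →
      pvInv l i (i + 1)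
        ((List.range i).foldl
          (fun m i => (List.range' (i + 1) (l.length - (i + 1))).foldl (fun m j => pvStep l m i j) m)
          (List.replicate l.length ([] : List Nat))) := by
  intro i
  induction i with
  | zero =>
    intro _
    simp only [List.range_zero, List.foldl_nil]
    refine ⟨by simp, fun k j => ?_⟩
    have : (List.replicate l.length ([] : List Nat)).getD k [] = [] := by
      rcases Nat.lt_or_ge k l.length with h | h
      · simp [List.getD_eq_getElem?_getD, h]
      · simp [List.getD_eq_getElem?_getD, List.getElem?_eq_none (by simpa using h)]
    rw [this]
    simp only [List.not_mem_nil, false_iff]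
    rintro ⟨h1, h2, h3, h4 | ⟨h4a, h4b⟩⟩
    · omega
    · rcases h3 with ⟨hlt, _⟩ | ⟨hlt, _⟩ <;> omega
  | succ i ih =>
    intro hle
    rw [List.range_succ, List.foldl_append, List.foldl_cons, List.foldl_nil]
    have hprev := ih (by omega)
    have hinner := pv_inner_inv l i (l.length - (i + 1)) (i + 1) _ hprev (by omega) (by omega)
    have heq : i + 1 + (l.length - (i + 1)) = l.length := by omega
    rw [heq] at hinner
    obtain ⟨hlen, hmem⟩ := hinner
    refine ⟨hlen, fun k j => ?_⟩
    rw [hmem k j]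
    constructor
    · rintro ⟨h1, h2, h3, h4⟩
      refine ⟨h1, h2, h3, ?_⟩
      left; rcases h4 with h4 | ⟨h4a, h4b⟩ <;> omega
    · rintro ⟨h1, h2, h3, h4⟩
      refine ⟨h1, h2, h3, ?_⟩
      have hmm : min k j < max k j ∧ max k j < l.length := by
        rcases h3 with ⟨hlt, _⟩ | ⟨hlt, _⟩ <;> omega
      omega

-- characterisation of A's finished matching_list: membership = compatibility
theorem pv_matching_mem (l : List (Int × Int × Int)) (k j : Nat) :
    j ∈ (pvMatching l).getD k [] ↔ (k < l.length ∧ j < l.length ∧ pvCompat l k j) := by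
  have h := pv_outer_inv l l.length (le_refl _)
  obtain ⟨-, hmem⟩ := h
  unfold pvMatching
  rw [hmem k j]
  constructor
  · rintro ⟨h1, h2, h3, -⟩; exact ⟨h1, h2, h3⟩
  · rintro ⟨h1, h2, h3⟩
    refine ⟨h1, h2, h3, ?_⟩
    rcases h3 with ⟨hlt, _⟩ | ⟨hlt, _⟩ <;> omega

theorem pv_suf_cons (t : Int × Int × Int) (r : List (Int × Int × Int)) :
    pvSuf (t :: r) = (max t.2.2 ((pvSuf r).getD 0 0)) :: pvSuf r := rfl

-- suffix maximum: nonnegative, dominates every later value, and is 0 or attained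
theorem pv_suf_nonneg (l : List (Int × Int × Int)) : ∀ (k : Nat), 0 ≤ (pvSuf l).getD k 0 := by
  induction l with
  | nil => intro k; cases k <;> simp [pvSuf]
  | cons t r ih =>
    intro k
    cases k with
    | zero =>
      rw [pv_suf_cons, List.getD_cons_zero]
      exact le_max_of_le_right (ih 0)
    | succ k => rw [pv_suf_cons, List.getD_cons_succ]; exact ih k

theorem pv_suf_ge (l : List (Int × Int × Int)) :
    ∀ (k j : Nat), k ≤ j → j < l.length →
      (l.getD j (0, 0, 0)).2.2 ≤ (pvSuf l).getD k 0 := by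
  induction l with
  | nil => intro k j _ h; simp at h
  | cons t r ih =>
    intro k j hkj hj
    cases k with
    | zero =>
      rw [pv_suf_cons, List.getD_cons_zero]
      cases j with
      | zero => rw [List.getD_cons_zero]; exact le_max_left _ _
      | succ j =>
        rw [List.getD_cons_succ]
        exact le_max_of_le_right (ih 0 j (Nat.zero_le _) (by simpa using hj))
    | succ k =>
      cases j with
      | zero => omega
      | succ j =>
        rw [pv_suf_cons, List.getD_cons_succ, List.getD_cons_succ]
        exact ih k j (by omega) (by simpa using hj)

theorem pv_suf_cases (l : List (Int × Int × Int)) :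
    ∀ k : Nat, (pvSuf l).getD k 0 = 0 ∨
      ∃ j : Nat, k ≤ j ∧ j < l.length ∧ (pvSuf l).getD k 0 = (l.getD j (0, 0, 0)).2.2 := by
  induction l with
  | nil => intro k; left; cases k <;> simp [pvSuf]
  | cons t r ih =>
    intro k
    cases k with
    | zero =>
      rw [pv_suf_cons, List.getD_cons_zero]
      rcases max_choice t.2.2 ((pvSuf r).getD 0 0) with h | h
      · right; exact ⟨0, le_refl _, by simp, by rw [h, List.getD_cons_zero]⟩
      · rcases ih 0 with h0 | ⟨j, -, hj, he⟩
        · left; rw [h, h0]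
        · right
          exact ⟨j + 1, by omega, by simpa using Nat.succ_lt_succ hj,
            by rw [h, he, List.getD_cons_succ]⟩
    | succ k =>
      rw [pv_suf_cons, List.getD_cons_succ]
      rcases ih k with h0 | ⟨j, hkj, hj, he⟩
      · left; exact h0
      · right
        exact ⟨j + 1, by omega, by simpa using Nat.succ_lt_succ hj,
          by rw [he, List.getD_cons_succ]⟩

theorem pv_foldmax_le (n : Nat) (f g : Nat → Int)
    (h : ∀ i < n, f i ≤ (List.range n).foldl (fun a x => max a (g x)) 0) :
    (List.range n).foldl (fun a x => max a (f x)) 0 ≤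
      (List.range n).foldl (fun a x => max a (g x)) 0 := by
  rcases pv_foldl_maxf_cases f (List.range n) 0 with h0 | ⟨i, hi, he⟩
  · rw [h0]; exact (PySem.List.le_foldl_max_int (List.range n) g 0).1
  · rw [he]; exact h i (List.mem_range.mp hi)

-- core: on any list whose first components are nondecreasing, A's fold equals B's fold
theorem pv_core (l : List (Int × Int × Int))
    (hmono : (l.map (fun t => t.1)).Pairwise (· ≤ ·)) :
    (List.range l.length).foldl
      (fun g i =>
        max g ((l.getD i (0, 0, 0)).2.2 +
          ((pvMatching l).getD i []).foldl (fun acc j => max acc ((l.getD j (0, 0, 0)).2.2)) 0))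
      0
    =
    (List.range l.length).foldl
      (fun best i =>
        let t := l.getD i (0, 0, 0)
        let r := PySem.List.bisectRight (l.map (fun t => t.1)) t.2.1
        let lo := if r < i + 1 then i + 1 else r
        max best (t.2.2 + (pvSuf l).getD lo 0))
      0 := by
  have hsj : ∀ (j : Nat) (hj : j < l.length),
      (l.map (fun t => t.1))[j]'(by simpa using hj) = (l.getD j (0, 0, 0)).1 := by
    intro j hj
    simp [List.getD_eq_getElem, hj]
  have hbspec : ∀ x : Int,
      PySem.List.bisectRight (l.map (fun t => t.1)) x ≤ l.length ∧
      (∀ (j : Nat) (hj : j < l.length), j < PySem.List.bisectRight (l.map (fun t => t.1)) x →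
        (l.getD j (0, 0, 0)).1 ≤ x) ∧
      (∀ (j : Nat) (hj : j < l.length), PySem.List.bisectRight (l.map (fun t => t.1)) x ≤ j →
        x < (l.getD j (0, 0, 0)).1) := by
    intro x
    obtain ⟨h1, h2, h3⟩ := PySem.List.bisectRight_spec (l.map (fun t => t.1)) x hmono
    refine ⟨by simpa using h1, ?_, ?_⟩
    · intro j hj hlt
      have := h2 j (by simpa using hj) hlt
      rwa [hsj j hj] at this
    · intro j hj hle
      have := h3 j (by simpa using hj) hle
      rwa [hsj j hj] at this
  set fA : Nat → Int := fun i =>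
    (l.getD i (0, 0, 0)).2.2 +
      ((pvMatching l).getD i []).foldl (fun acc j => max acc ((l.getD j (0, 0, 0)).2.2)) 0
    with hfA
  set fB : Nat → Int := fun i =>
    (l.getD i (0, 0, 0)).2.2 +
      (pvSuf l).getD
        (if PySem.List.bisectRight (l.map (fun t => t.1)) ((l.getD i (0, 0, 0)).2.1) < i + 1
         then i + 1
         else PySem.List.bisectRight (l.map (fun t => t.1)) ((l.getD i (0, 0, 0)).2.1)) 0
    with hfB
  have hmfa_nonneg : ∀ i : Nat,
      0 ≤ ((pvMatching l).getD i []).foldl (fun acc j => max acc ((l.getD j (0, 0, 0)).2.2)) 0 :=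
    fun i => (PySem.List.le_foldl_max_int ((pvMatching l).getD i [])
      (fun j => (l.getD j (0, 0, 0)).2.2) 0).1
  have hmfa_ge : ∀ (i j : Nat), j ∈ (pvMatching l).getD i [] →
      (l.getD j (0, 0, 0)).2.2 ≤
        ((pvMatching l).getD i []).foldl (fun acc j => max acc ((l.getD j (0, 0, 0)).2.2)) 0 :=
    fun i j hj => (PySem.List.le_foldl_max_int ((pvMatching l).getD i [])
      (fun j => (l.getD j (0, 0, 0)).2.2) 0).2 j hj
  have hFBterm : ∀ i < l.length, fB i ≤ (List.range l.length).foldl (fun a x => max a (fB x)) 0 :=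
    fun i hi => (PySem.List.le_foldl_max_int (List.range l.length) fB 0).2 i (List.mem_range.mpr hi)
  have hFAterm : ∀ i < l.length, fA i ≤ (List.range l.length).foldl (fun a x => max a (fA x)) 0 :=
    fun i hi => (PySem.List.le_foldl_max_int (List.range l.length) fA 0).2 i (List.mem_range.mpr hi)
  have hloB : ∀ i : Nat, i + 1 ≤
      (if PySem.List.bisectRight (l.map (fun t => t.1)) ((l.getD i (0, 0, 0)).2.1) < i + 1
       then i + 1
       else PySem.List.bisectRight (l.map (fun t => t.1)) ((l.getD i (0, 0, 0)).2.1)) := by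
    intro i; split <;> omega
  show (List.range l.length).foldl (fun a x => max a (fA x)) 0 =
      (List.range l.length).foldl (fun a x => max a (fB x)) 0
  apply le_antisymm
  · -- A ≤ B: every recorded partner pair is beaten by a B term
    apply pv_foldmax_le
    intro i hi
    rcases pv_foldl_maxf_cases (fun j => (l.getD j (0, 0, 0)).2.2) ((pvMatching l).getD i []) 0
      with h0 | ⟨j, hjmem, hje⟩
    · have : fA i ≤ fB i := by
        rw [hfA, hfB]
        simp only
        rw [h0]
        have := pv_suf_nonneg l
          (if PySem.List.bisectRight (l.map (fun t => t.1)) ((l.getD i (0, 0, 0)).2.1) < i + 1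
           then i + 1
           else PySem.List.bisectRight (l.map (fun t => t.1)) ((l.getD i (0, 0, 0)).2.1))
        omega
      exact le_trans this (hFBterm i hi)
    · obtain ⟨hki, hji, hcomp⟩ := (pv_matching_mem l i j).mp hjmem
      rcases hcomp with ⟨hij, hcmp⟩ | ⟨hji2, hcmp⟩
      · -- forward partner: beaten by fB i
        set r := PySem.List.bisectRight (l.map (fun t => t.1)) ((l.getD i (0, 0, 0)).2.1) with hr
        have hjr : r ≤ j := by
          by_contra hlt
          have := (hbspec ((l.getD i (0, 0, 0)).2.1)).2.1 j hji (by omega)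
          omega
        have hlo : (if r < i + 1 then i + 1 else r) ≤ j := by split <;> omega
        have hsge := pv_suf_ge l (if r < i + 1 then i + 1 else r) j hlo hji
        have : fA i ≤ fB i := by
          rw [hfA, hfB]; simp only; rw [hje, ← hr]
          omega
        exact le_trans this (hFBterm i hi)
      · -- backward partner: beaten by fB j
        set r := PySem.List.bisectRight (l.map (fun t => t.1)) ((l.getD j (0, 0, 0)).2.1) with hr
        have hir : r ≤ i := by
          by_contra hlt
          have := (hbspec ((l.getD j (0, 0, 0)).2.1)).2.1 i hki (by omega)
          omega
        have hlo : (if r < j + 1 then j + 1 else r) ≤ i := by split <;> omega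
        have hsge := pv_suf_ge l (if r < j + 1 then j + 1 else r) i hlo hki
        have : fA i ≤ fB j := by
          rw [hfA, hfB]; simp only; rw [hje, ← hr]
          omega
        exact le_trans this (hFBterm j hji)
  · -- B ≤ A: the value found by binary search is a recorded partner
    apply pv_foldmax_le
    intro i hi
    set r := PySem.List.bisectRight (l.map (fun t => t.1)) ((l.getD i (0, 0, 0)).2.1) with hr
    rcases pv_suf_cases l (if r < i + 1 then i + 1 else r) with h0 | ⟨j, hloj, hji, hje⟩
    · have : fB i ≤ fA i := by
        rw [hfA, hfB]; simp only; rw [← hr, h0]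
        have := hmfa_nonneg i
        omega
      exact le_trans this (hFAterm i hi)
    · have hij : i < j := by have := hloB i; rw [← hr] at this; omega
      have hrj : r ≤ j := by split at hloj <;> omega
      have hcmp := (hbspec ((l.getD i (0, 0, 0)).2.1)).2.2 j hji (by rw [← hr]; omega)
      have hjmem : j ∈ (pvMatching l).getD i [] :=
        (pv_matching_mem l i j).mpr ⟨by omega, hji, Or.inl ⟨hij, hcmp⟩⟩
      have hge := hmfa_ge i j hjmem
      have : fB i ≤ fA i := by
        rw [hfA, hfB]; simp only; rw [← hr, hje]
        omega
      exact le_trans this (hFAterm i hi)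

-- the sorted list produced by pvBuildI has nondecreasing first components: on the
-- Dom-bounded components pvKey is lexicographically monotone
theorem pv_buildI_mono (Intervals : List (Int × Int)) (val : List Int) (max_days : Int)
    (hdom : Dom_reklamy Intervals val max_days) (hpre : Pre_reklamy Intervals val max_days) :
    ((pvBuildI Intervals val).map (fun t => t.1)).Pairwise (· ≤ ·) := by
  unfold Dom_reklamy at hdom
  simp only [Bool.and_eq_true, List.all_eq_true] at hdom
  obtain ⟨⟨hiv, hval⟩, -⟩ := hdom
  have hbnd : ∀ x ∈ (PySem.List.enumerate Intervals).map
      (fun p => (p.2.1, p.2.2, PySem.List.pyGetD val p.1 0)),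
      (-2147483648 ≤ x.2.1 ∧ x.2.1 ≤ 2147483648) ∧
      (-2147483648 ≤ x.2.2 ∧ x.2.2 ≤ 2147483648) := by
    intro x hx
    rcases List.mem_map.mp hx with ⟨p, hp, rfl⟩
    rcases (PySem.List.mem_enumerate_iff _ _ _).mp hp with ⟨k, hk, rfl⟩
    simp only
    constructor
    · have := hiv (Intervals[k]) (List.getElem_mem hk)
      simp only [Bool.and_eq_true, pvDomInt, decide_eq_true_eq] at this
      exact this.2
    · have hkv : k < val.length := lt_of_lt_of_le hk hpre
      have : PySem.List.pyGetD val ((0 : Int) + (k : Int)) 0 = val[k] := by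
        rw [zero_add, PySem.List.pyGetD_natCast, List.getD_eq_getElem val 0 hkv]
      rw [this]
      have := hval (val[k]) (List.getElem_mem hkv)
      simpa [pvDomInt] using this
  have hpw := PySem.List.sorted_pairwise ((PySem.List.enumerate Intervals).map
      (fun p => (p.2.1, p.2.2, PySem.List.pyGetD val p.1 0))) pvKey
  have hbnd' : ∀ x ∈ pvBuildI Intervals val,
      (-2147483648 ≤ x.2.1 ∧ x.2.1 ≤ 2147483648) ∧
      (-2147483648 ≤ x.2.2 ∧ x.2.2 ≤ 2147483648) := by
    intro x hx
    exact hbnd x ((PySem.List.mem_sorted _ _ _ _).mp hx)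
  have hpw2 : (pvBuildI Intervals val).Pairwise (fun s t => s.1 ≤ t.1) := by
    refine List.Pairwise.imp_of_mem ?_ hpw
    intro s t hs ht hkey
    obtain ⟨hs1, hs2⟩ := hbnd' s hs
    obtain ⟨ht1, ht2⟩ := hbnd' t ht
    unfold pvKey at hkey
    by_contra hlt
    push Not at hlt
    omega
  rw [List.pairwise_map]
  exact hpw2

-- ===== VERDICT (by name: the statement is the Claim_ definition above) =====
theorem reklamy_spec : Claim_equal_reklamy := by
  intro Intervals val max_days hdom hpre
  show reklamy Intervals val max_days = reklamy_alt Intervals val max_days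
  unfold reklamy reklamy_alt
  exact pv_core (pvBuildI Intervals val) (pv_buildI_mono Intervals val max_days hdom hpre)
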